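-- pv_equiv track=rewrite | github.com/idleh4021/study-algorithm | Python3/프로그래머스/0/120861. 캐릭터의 좌표/캐릭터의 좌표.py | solution
-- ===== SOURCE A (Python) =====
-- def solution(keyinput, board):
--     key_value = {'up':[0,1],'down':[0,-1],'left':[-1,0],'right':[1,0]}
--     x,y=0,0
--     for key in keyinput:
--         x=x+key_value[key][0]  if abs(x+key_value[key][0])<=(board[0]-1)//2 else x
--         y=y+key_value[key][1] if abs(y+key_value[key][1])<=(board[1]-1)//2 else y
--     answer = [x,y]
--     return answer
-- ===== SOURCE B (Python) =====
-- def solution(keyinput, board):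
--     bx = max(0, (board[0] - 1) // 2)
--     by = max(0, (board[1] - 1) // 2)
--     x = 0
--     for key in keyinput:
--         if key == 'left':
--             x = max(-bx, min(bx, x - 1))
--         elif key == 'right':
--             x = max(-bx, min(bx, x + 1))
--     y = 0
--     for key in keyinput:
--         if key == 'up':
--             y = max(-by, min(by, y + 1))
--         elif key == 'down':
--             y = max(-by, min(by, y - 1))
--     return [x, y]
-- ===== Notes on version B (the rewrite author's own statement) =====
-- stated objective: simpler
-- what changed: Replaces the single interleaved loop with dict lookups and abs-guarded conditional updates by two independent single-axis passes that clamp each unit step with max/min against precomputed nonnegative half-widths.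
-- outside the precondition, e.g. on solution([], []): A returns [0, 0], B raises IndexError
import Mathlib
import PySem

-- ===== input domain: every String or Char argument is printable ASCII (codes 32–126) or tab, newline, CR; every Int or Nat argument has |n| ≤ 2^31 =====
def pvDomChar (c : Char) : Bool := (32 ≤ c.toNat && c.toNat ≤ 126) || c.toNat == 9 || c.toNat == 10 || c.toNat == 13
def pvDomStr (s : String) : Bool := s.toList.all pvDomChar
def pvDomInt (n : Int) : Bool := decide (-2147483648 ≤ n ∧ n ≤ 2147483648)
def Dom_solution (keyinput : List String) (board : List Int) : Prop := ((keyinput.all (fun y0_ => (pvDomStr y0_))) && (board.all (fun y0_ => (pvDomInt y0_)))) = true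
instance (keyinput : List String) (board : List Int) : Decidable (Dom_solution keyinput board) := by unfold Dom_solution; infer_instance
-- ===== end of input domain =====

-- B splits A's single interleaved loop (dict lookup + abs-guarded conditional move) into two
-- independent single-axis passes that clamp each unit step with max/min; same cost, simpler.


-- ===== PORT A =====
-- key_value dict of A (Python dict literal)
def keyValueA : PySem.Dict String (List Int) :=
  PySem.Dict.ofList [("up", [0, 1]), ("down", [0, -1]), ("left", [-1, 0]), ("right", [1, 0])]

-- one iteration of A's loop body; Pre_ excludes the KeyError (bad key) and IndexError
-- (board shorter than 2) inputs, where the `.getD` defaults are never reached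
def stepA (board : List Int) (xy : Int × Int) (key : String) : Int × Int :=
  let kv := (keyValueA.get? key).getD []
  let dx := (PySem.List.pyGet? kv 0).getD 0
  let dy := (PySem.List.pyGet? kv 1).getD 0
  let b0 := (PySem.List.pyGet? board 0).getD 0
  let b1 := (PySem.List.pyGet? board 1).getD 0
  let x := if |xy.1 + dx| ≤ PySem.Int.floordiv (b0 - 1) 2 then xy.1 + dx else xy.1
  let y := if |xy.2 + dy| ≤ PySem.Int.floordiv (b1 - 1) 2 then xy.2 + dy else xy.2
  (x, y)

def solution (keyinput : List String) (board : List Int) : List Int :=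
  let xy := keyinput.foldl (stepA board) (0, 0)
  [xy.1, xy.2]

-- ===== PORT B =====
def stepBX (bx x : Int) (key : String) : Int :=
  if key = "left" then max (-bx) (min bx (x - 1))
  else if key = "right" then max (-bx) (min bx (x + 1))
  else x

def stepBY (by_ y : Int) (key : String) : Int :=
  if key = "up" then max (-by_) (min by_ (y + 1))
  else if key = "down" then max (-by_) (min by_ (y - 1))
  else y

def solution_alt (keyinput : List String) (board : List Int) : List Int :=
  let bx := max 0 (PySem.Int.floordiv ((PySem.List.pyGet? board 0).getD 0 - 1) 2)
  let by_ := max 0 (PySem.Int.floordiv ((PySem.List.pyGet? board 1).getD 0 - 1) 2)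
  let x := keyinput.foldl (stepBX bx) 0
  let y := keyinput.foldl (stepBY by_) 0
  [x, y]

-- ===== PRECONDITION & SPEC =====
-- Pre_ requires a board of length ≥ 2 and only the four arrow keys: on any other key A
-- raises KeyError, and on a board shorter than 2 A returns [0,0] only when keyinput is
-- empty (it never reads the board) while B reads board[0] first and raises IndexError.
def Pre_solution (keyinput : List String) (board : List Int) : Prop :=
  (∀ k ∈ keyinput, k = "up" ∨ k = "down" ∨ k = "left" ∨ k = "right") ∧
  2 ≤ board.length
instance (keyinput : List String) (board : List Int) : Decidable (Pre_solution keyinput board) := by unfold Pre_solution; infer_instance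

def pvWitness_solution : List String × List Int := (["left", "left", "up", "down", "right"], [7, 5])

def Spec_solution (keyinput : List String) (board : List Int) (out : List Int) : Prop := out = solution_alt keyinput board
instance (keyinput : List String) (board : List Int) (out : List Int) : Decidable (Spec_solution keyinput board out) := by unfold Spec_solution; infer_instance

-- ===== CLAIM (what is proved, stated in full; the proofs are below) =====
def Claim_equal_solution : Prop := ∀ (keyinput : List String) (board : List Int), Dom_solution keyinput board → Pre_solution keyinput board → Spec_solution keyinput board (solution keyinput board)

-- ===== LEMMAS AND PROOFS =====

-- B's clamped steps stay inside [-b, b] when they start there (b ≥ 0).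
lemma stepBX_bounds (bx x : Int) (k : String) (hb : 0 ≤ bx) (h1 : -bx ≤ x) (h2 : x ≤ bx) :
    -bx ≤ stepBX bx x k ∧ stepBX bx x k ≤ bx := by
  unfold stepBX; split_ifs <;> constructor <;> omega

lemma stepBY_bounds (by_ y : Int) (k : String) (hb : 0 ≤ by_) (h1 : -by_ ≤ y) (h2 : y ≤ by_) :
    -by_ ≤ stepBY by_ y k ∧ stepBY by_ y k ≤ by_ := by
  unfold stepBY; split_ifs <;> constructor <;> omega

-- literal-index board lookups reduce to the first two entries
lemma boardGet0 (b0 : Int) (t : List Int) : (PySem.List.pyGet? (b0 :: t) 0).getD 0 = b0 := by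
  rw [PySem.List.pyGet?_zero_cons]; rfl

lemma boardGet1 (b0 b1 : Int) (t : List Int) : (PySem.List.pyGet? (b0 :: b1 :: t) 1).getD 0 = b1 := by
  rw [show ((1 : Int)) = ((1 : Nat) : Int) from rfl, PySem.List.pyGet?_natCast]; rfl

-- A's loop body on each of the four literal keys
lemma stepA_up (b0 b1 : Int) (rest : List Int) (x y : Int) :
    stepA (b0 :: b1 :: rest) (x, y) "up" =
      (x, if |y + 1| ≤ PySem.Int.floordiv (b1 - 1) 2 then y + 1 else y) := by
  have h : (keyValueA.get? "up").getD [] = ([0, 1] : List Int) := rfl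
  simp [stepA, h, PySem.List.pyGet?, PySem.List.pyIdx?]

lemma stepA_down (b0 b1 : Int) (rest : List Int) (x y : Int) :
    stepA (b0 :: b1 :: rest) (x, y) "down" =
      (x, if |y - 1| ≤ PySem.Int.floordiv (b1 - 1) 2 then y - 1 else y) := by
  have h : (keyValueA.get? "down").getD [] = ([0, -1] : List Int) := rfl
  simp [stepA, h, PySem.List.pyGet?, PySem.List.pyIdx?, sub_eq_add_neg]

lemma stepA_left (b0 b1 : Int) (rest : List Int) (x y : Int) :
    stepA (b0 :: b1 :: rest) (x, y) "left" =
      (if |x - 1| ≤ PySem.Int.floordiv (b0 - 1) 2 then x - 1 else x, y) := by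
  have h : (keyValueA.get? "left").getD [] = ([-1, 0] : List Int) := rfl
  have hpos : (0 : Int) ≤ ↑rest.length + 1 := by positivity
  simp [stepA, h, hpos, PySem.List.pyGet?, PySem.List.pyIdx?, sub_eq_add_neg]

lemma stepA_right (b0 b1 : Int) (rest : List Int) (x y : Int) :
    stepA (b0 :: b1 :: rest) (x, y) "right" =
      (if |x + 1| ≤ PySem.Int.floordiv (b0 - 1) 2 then x + 1 else x, y) := by
  have h : (keyValueA.get? "right").getD [] = ([1, 0] : List Int) := rfl
  have hpos : (0 : Int) ≤ ↑rest.length + 1 := by positivity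
  simp [stepA, h, hpos, PySem.List.pyGet?, PySem.List.pyIdx?]

-- On a valid key and an in-bounds state, A's loop body is exactly B's pair of clamped steps.
lemma stepA_eq (b0 b1 : Int) (rest : List Int) (k : String)
    (hk : k = "up" ∨ k = "down" ∨ k = "left" ∨ k = "right") (x y : Int)
    
    (hx1 : -(max 0 (PySem.Int.floordiv (b0 - 1) 2)) ≤ x) (hx2 : x ≤ (max 0 (PySem.Int.floordiv (b0 - 1) 2)))
    (hy1 : -(max 0 (PySem.Int.floordiv (b1 - 1) 2)) ≤ y) (hy2 : y ≤ (max 0 (PySem.Int.floordiv (b1 - 1) 2))) :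
    stepA (b0 :: b1 :: rest) (x, y) k =
      (stepBX (max 0 (PySem.Int.floordiv (b0 - 1) 2)) x k, stepBY (max 0 (PySem.Int.floordiv (b1 - 1) 2)) y k) := by
  have hf0 : PySem.Int.floordiv (b0 - 1) 2 = (b0 - 1) / 2 :=
    PySem.Int.floordiv_eq_ediv_of_pos (by norm_num)
  have hf1 : PySem.Int.floordiv (b1 - 1) 2 = (b1 - 1) / 2 :=
    PySem.Int.floordiv_eq_ediv_of_pos (by norm_num)
  simp only [hf0, hf1] at hx1 hx2 hy1 hy2
  rcases hk with h | h | h | h <;> subst h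
  · rw [stepA_up]
    simp [stepBX, stepBY, Prod.mk.injEq, abs_le]
    omega
  · rw [stepA_down]
    simp [stepBX, stepBY, Prod.mk.injEq, abs_le]
    omega
  · rw [stepA_left]
    simp [stepBX, stepBY, Prod.mk.injEq, abs_le]
    omega
  · rw [stepA_right]
    simp [stepBX, stepBY, Prod.mk.injEq, abs_le]
    omega

-- A's combined fold splits into B's two clamped single-axis folds.
lemma foldA_split (b0 b1 : Int) (rest : List Int) (keys : List String)
    (hk : ∀ k ∈ keys, k = "up" ∨ k = "down" ∨ k = "left" ∨ k = "right") :
    ∀ (x y : Int),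
      -(max 0 (PySem.Int.floordiv (b0 - 1) 2)) ≤ x → x ≤ (max 0 (PySem.Int.floordiv (b0 - 1) 2)) →
      -(max 0 (PySem.Int.floordiv (b1 - 1) 2)) ≤ y → y ≤ (max 0 (PySem.Int.floordiv (b1 - 1) 2)) →
      keys.foldl (stepA (b0 :: b1 :: rest)) (x, y) =
        (keys.foldl (stepBX (max 0 (PySem.Int.floordiv (b0 - 1) 2))) x,
         keys.foldl (stepBY (max 0 (PySem.Int.floordiv (b1 - 1) 2))) y) := by
  induction keys with
  | nil => intro x y _ _ _ _; rfl
  | cons k ks ih =>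
    intro x y hx1 hx2 hy1 hy2
    have hkk := hk k (by simp)
    have hks : ∀ k' ∈ ks, k' = "up" ∨ k' = "down" ∨ k' = "left" ∨ k' = "right" :=
      fun k' hk' => hk k' (by simp [hk'])
    simp only [List.foldl_cons]
    rw [stepA_eq b0 b1 rest k hkk x y hx1 hx2 hy1 hy2]
    obtain ⟨hx1', hx2'⟩ := stepBX_bounds _ x k (le_max_left 0 _) hx1 hx2
    obtain ⟨hy1', hy2'⟩ := stepBY_bounds _ y k (le_max_left 0 _) hy1 hy2
    exact ih hks _ _ hx1' hx2' hy1' hy2'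

-- ===== VERDICT (by name: the statement is the Claim_ definition above) =====
theorem solution_spec : Claim_equal_solution := by
  intro keyinput board _ hpre
  obtain ⟨hk, hlen⟩ := hpre
  match board, hlen with
  | b0 :: b1 :: rest, _ =>
    show _ = solution_alt _ _
    simp only [solution, solution_alt, boardGet0, boardGet1]
    rw [foldA_split b0 b1 rest keyinput hk 0 0 (by simp) (le_max_left 0 _) (by simp) (le_max_left 0 _)]
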